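-- pv_equiv track=rewrite | github.com/defold/build-size | analyze_builds.py | apply_symbol_grouping
-- ===== SOURCE A (Python) =====
-- def apply_symbol_grouping(symbol_name):
--     """
--     Apply symbol grouping rules to compress similar symbols.
--     Returns tuple: (group_name, is_grouped)
--     """
--
--     # Rule 1: C++ namespace - group by string before "::"
--     if '::' in symbol_name:
--         namespace = symbol_name.split('::')[0]
--         return namespace, True
--
--     # Rule 2: String between underscores (at least two underscores, not consecutive)
--     # Find the first pair of non-consecutive underscores with content between them
--     underscores = [i for i, char in enumerate(symbol_name) if char == '_']
--
--     if len(underscores) >= 2: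
--         # Look for the first pair of underscores with content between them
--         for i in range(len(underscores) - 1):
--             first_underscore = underscores[i]
--             second_underscore = underscores[i + 1]
--
--             # Check if there's content between these underscores
--             if second_underscore - first_underscore > 1:
--                 middle_part = symbol_name[first_underscore + 1:second_underscore]
--                 if middle_part:  # Not empty
--                     return f"_{middle_part}_* (library)", True
--
--     # Rule 3: Not grouped - keep individual
--     return symbol_name, False
-- ===== SOURCE B (Python) =====
-- def apply_symbol_grouping(symbol_name):
--     """
--     Apply symbol grouping rules to compress similar symbols.
--     Returns tuple: (group_name, is_grouped)
--     """
--     # Rule 1: C++ namespace - group by string before "::"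
--     if '::' in symbol_name:
--         return symbol_name.split('::')[0], True
--
--     # Rule 2: single pass - remember the last underscore seen; as soon as a
--     # later underscore leaves non-empty content after it, group on that content.
--     prev = None
--     for i, ch in enumerate(symbol_name):
--         if ch == '_':
--             if prev is not None and i - prev > 1:
--                 return f"_{symbol_name[prev + 1:i]}_* (library)", True
--             prev = i
--
--     # Rule 3: Not grouped - keep individual
--     return symbol_name, False
-- ===== Notes on version B (the rewrite author's own statement) =====
-- stated objective: simpler
-- what changed: Rule 2 no longer builds the list of all underscore positions and then scans adjacent pairs with slicing checks: B does a single pass over the characters keeping only the previous underscore index and returns on the first pair with content between them.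
import Mathlib
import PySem

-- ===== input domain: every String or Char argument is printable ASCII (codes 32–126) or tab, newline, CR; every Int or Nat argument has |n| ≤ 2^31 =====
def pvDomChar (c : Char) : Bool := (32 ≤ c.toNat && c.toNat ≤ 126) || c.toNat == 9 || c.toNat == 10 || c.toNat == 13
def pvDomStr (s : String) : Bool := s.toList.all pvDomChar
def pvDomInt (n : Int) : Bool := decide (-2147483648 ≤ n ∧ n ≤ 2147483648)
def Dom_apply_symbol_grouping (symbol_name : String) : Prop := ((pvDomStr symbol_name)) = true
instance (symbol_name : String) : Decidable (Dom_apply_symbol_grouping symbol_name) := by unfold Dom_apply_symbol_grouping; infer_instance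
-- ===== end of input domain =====

-- B replaces A's underscore-position list and adjacent-pair scan by a single pass that only
-- remembers the previous underscore index (simpler; Rule 1 is unchanged).

-- ===== PORT A =====
-- A's inner 'for i in range(len(underscores)-1)' loop with early return, as recursion on
-- the list of underscore positions (adjacent pairs).
def pvPairs (s : List Char) : List Int → Option (List Char)
  | u1 :: u2 :: rest =>
    if u2 - u1 > 1 then
      let middle := PySem.List.slice s (some (u1 + 1)) (some u2)
      if middle ≠ [] then some middle else pvPairs s (u2 :: rest)
    else pvPairs s (u2 :: rest)
  | _ => none

def apply_symbol_grouping (symbol_name : String) : String × Bool :=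
  if PySem.Str.isIn "::" symbol_name then
    (String.ofList ((PySem.Chars.splitOn symbol_name.toList "::".toList).headD []), true)
  else
    let underscores := ((PySem.List.enumerate symbol_name.toList 0).filter
        (fun p => p.2 == '_')).map (fun p => p.1)
    if underscores.length ≥ 2 then
      match pvPairs symbol_name.toList underscores with
      | some middle => (String.ofList ('_' :: (middle ++ "_* (library)".toList)), true)
      | none => (symbol_name, false)
    else (symbol_name, false)

-- ===== PORT B =====
-- B's single 'for i, ch in enumerate(symbol_name)' loop with the 'prev' state.
def pvScan (s : List Char) : List (Int × Char) → Option Int → Option (List Char)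
  | [], _ => none
  | (i, ch) :: rest, prev =>
    if ch == '_' then
      match prev with
      | some p =>
        if i - p > 1 then some (PySem.List.slice s (some (p + 1)) (some i))
        else pvScan s rest (some i)
      | none => pvScan s rest (some i)
    else pvScan s rest prev

def apply_symbol_grouping_alt (symbol_name : String) : String × Bool :=
  if PySem.Str.isIn "::" symbol_name then
    (String.ofList ((PySem.Chars.splitOn symbol_name.toList "::".toList).headD []), true)
  else
    match pvScan symbol_name.toList (PySem.List.enumerate symbol_name.toList 0) none with
    | some middle => (String.ofList ('_' :: (middle ++ "_* (library)".toList)), true)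
    | none => (symbol_name, false)

-- ===== PRECONDITION & SPEC =====
def Spec_apply_symbol_grouping (symbol_name : String) (out : String × Bool) : Prop := out = apply_symbol_grouping_alt symbol_name
instance (symbol_name : String) (out : String × Bool) : Decidable (Spec_apply_symbol_grouping symbol_name out) := by unfold Spec_apply_symbol_grouping; infer_instance

-- ===== CLAIM (what is proved, stated in full; the proofs are below) =====
def Claim_equal_apply_symbol_grouping : Prop := ∀ (symbol_name : String), Dom_apply_symbol_grouping symbol_name → Spec_apply_symbol_grouping symbol_name (apply_symbol_grouping symbol_name)

-- ===== LEMMAS AND PROOFS =====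

-- A list of fewer than two underscore positions yields no group.
theorem pvPairs_short (s : List Char) (l : List Int) (h : l.length < 2) :
    pvPairs s l = none := by
  match l with
  | [] => rfl
  | [_] => rfl
  | _ :: _ :: _ => simp at h

-- B's scan over the enumeration of a suffix equals A's pair scan over the underscore
-- positions of that suffix, with the pending 'prev' index prepended.
theorem pvScan_eq_pvPairs (s : List Char) (cs : List Char) (k : Nat) (prev : Option Int)
    (hlen : k + cs.length ≤ s.length)
    (hprev : ∀ p ∈ prev, ∃ q : Nat, p = (q : Int) ∧ q < k) :
    pvScan s (PySem.List.enumerate cs (k : Int)) prev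
      = pvPairs s (prev.toList ++
          ((PySem.List.enumerate cs (k : Int)).filter (fun p => p.2 == '_')).map (fun p => p.1)) := by
  induction cs generalizing k prev with
  | nil =>
    rw [PySem.List.enumerate_nil]
    cases prev with
    | none => rfl
    | some p => rfl
  | cons c cs ih =>
    rw [PySem.List.enumerate_cons]
    have hk1 : (k : Int) + 1 = ((k + 1 : Nat) : Int) := by push_cast; ring
    have hlen' : (k + 1) + cs.length ≤ s.length := by
      simp only [List.length_cons] at hlen; omega
    by_cases hc : (c == '_') = true
    · rw [List.filter_cons_of_pos (by simpa using hc)]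
      cases prev with
      | none =>
        simp only [pvScan, hc, if_true]
        rw [hk1, ih (k + 1) (some (k : Int)) hlen'
          (by intro p hp; exact ⟨k, by simpa using hp.symm, by omega⟩)]
        simp
      | some p =>
        obtain ⟨q, rfl, hq⟩ := hprev p rfl
        simp only [pvScan, hc, if_true, Option.toList_some, List.cons_append,
          List.nil_append, List.map_cons]
        by_cases hgt : (k : Int) - (q : Int) > 1
        · have hne : PySem.List.slice s (some ((q : Int) + 1)) (some (k : Int)) ≠ [] := by
            have hcast : ((q : Int) + 1) = ((q + 1 : Nat) : Int) := by push_cast; ring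
            rw [hcast, PySem.List.slice_natCast]
            intro hnil
            have := congrArg List.length hnil
            simp only [List.length_take, List.length_drop, List.length_nil] at this
            omega
          simp only [pvPairs, if_pos hgt, if_pos hne]
        · rw [if_neg hgt, hk1, ih (k + 1) (some (k : Int)) hlen'
            (by intro p hp; exact ⟨k, by simpa using hp.symm, by omega⟩)]
          simp only [pvPairs, if_neg hgt]
          simp
    · rw [List.filter_cons_of_neg (by simpa using hc)]
      simp only [pvScan, hc, if_false, Bool.false_eq_true]
      rw [hk1, ih (k + 1) prev hlen'
        (by intro p hp; obtain ⟨q, rfl, hq⟩ := hprev p hp; exact ⟨q, rfl, by omega⟩)]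

-- ===== VERDICT (by name: the statement is the Claim_ definition above) =====
theorem apply_symbol_grouping_spec : Claim_equal_apply_symbol_grouping := by
  intro symbol_name _
  unfold Spec_apply_symbol_grouping apply_symbol_grouping apply_symbol_grouping_alt
  by_cases hin : PySem.Str.isIn "::" symbol_name = true
  · rw [if_pos hin, if_pos hin]
  · rw [if_neg hin, if_neg hin]
    have hmain := pvScan_eq_pvPairs symbol_name.toList symbol_name.toList 0 none
      (by simp) (by simp)
    simp only [Nat.cast_zero, Option.toList_none, List.nil_append] at hmain
    rw [hmain]
    by_cases hlen2 : (((PySem.List.enumerate symbol_name.toList 0).filter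
        (fun p => p.2 == '_')).map (fun p => p.1)).length ≥ 2
    · rw [if_pos hlen2]
    · rw [if_neg hlen2, pvPairs_short _ _ (by omega)]
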